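-- pv_equiv track=rewrite | github.com/Toffaboffa/astro-spectra-mod | backend/engine/engine_v6.2.1.py | chem_symbol
-- ===== SOURCE A (Python) =====
-- _SUBS_DIGITS=str.maketrans("0123456789","₀₁₂₃₄₅₆₇₈₉")
--
-- def chem_symbol(species):
--     if species is None: return ""
--     s=str(species).strip()
--     repl={"N2 2P":"N2","N2 1P":"N2","N2+ 1N":"N2+","C2 Swan":"C2","CH G-band":"CH","CN violet":"CN","O2 A (abs)":"O2","O2 B (abs)":"O2"}
--     for k,v in repl.items():
--         if s.startswith(k): s=v; break
--     s=s.split()[0]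
--     s=s.translate(_SUBS_DIGITS).replace("+","⁺").replace("-","⁻")
--     return s
-- ===== SOURCE B (Python) =====
-- _SUB = {"0": "₀", "1": "₁", "2": "₂", "3": "₃", "4": "₄", "5": "₅",
--         "6": "₆", "7": "₇", "8": "₈", "9": "₉", "+": "⁺", "-": "⁻"}
--
-- def chem_symbol(species):
--     # Single left-to-right character scan: skip leading whitespace, then emit
--     # each character of the first token through the subscript/superscript map,
--     # stopping at the first whitespace after the token.  (A's prefix-replacement
--     # table is dead: every value equals the first token of its key.)
--     if species is None:
--         return ""
--     out = []
--     started = False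
--     for ch in str(species):
--         if ch.isspace():
--             if started:
--                 break
--         else:
--             started = True
--             out.append(_SUB.get(ch, ch))
--     return "".join(out)
-- ===== Notes on version B (the rewrite author's own statement) =====
-- stated objective: simpler
-- what changed: Replaced A's four staged passes (strip, prefix-replacement table loop, split()[0], translate+two replaces) by one left-to-right character scan that skips leading whitespace and emits the first token through a single char map; the prefix table is dead since each value equals the first token of its key.
import Mathlib
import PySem

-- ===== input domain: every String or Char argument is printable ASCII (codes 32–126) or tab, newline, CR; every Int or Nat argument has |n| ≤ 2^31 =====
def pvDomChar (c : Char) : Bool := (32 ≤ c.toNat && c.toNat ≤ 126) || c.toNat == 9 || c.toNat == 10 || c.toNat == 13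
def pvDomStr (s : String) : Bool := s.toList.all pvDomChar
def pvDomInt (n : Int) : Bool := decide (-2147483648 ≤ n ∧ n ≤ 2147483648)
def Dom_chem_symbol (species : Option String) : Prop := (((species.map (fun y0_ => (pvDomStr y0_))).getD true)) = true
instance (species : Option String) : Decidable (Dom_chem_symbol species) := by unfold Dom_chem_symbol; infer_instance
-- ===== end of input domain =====

-- B replaces A's staged passes (strip, dead prefix-replacement loop, split()[0], translate + two
-- replaces) by one left-to-right character scan emitting the first token through a char map: simpler.

-- ===== PORT A =====
-- _SUBS_DIGITS translate table, as a per-character map (exact for str.translate with this table)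
def chemSubDigit (c : Char) : Char :=
  if c = '0' then '₀' else if c = '1' then '₁' else if c = '2' then '₂'
  else if c = '3' then '₃' else if c = '4' then '₄' else if c = '5' then '₅'
  else if c = '6' then '₆' else if c = '7' then '₇' else if c = '8' then '₈'
  else if c = '9' then '₉' else c

-- s.translate(_SUBS_DIGITS).replace("+","⁺").replace("-","⁻")
def chemSubs (s : String) : String :=
  PySem.Str.replace (PySem.Str.replace (String.ofList (s.toList.map chemSubDigit)) "+" "⁺") "-" "⁻"

-- the repl dict of A, in insertion order (distinct keys, so an assoc list iterated in order)
def chemRepl : List (String × String) :=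
  [("N2 2P","N2"),("N2 1P","N2"),("N2+ 1N","N2+"),("C2 Swan","C2"),
   ("CH G-band","CH"),("CN violet","CN"),("O2 A (abs)","O2"),("O2 B (abs)","O2")]

-- for k,v in repl.items(): if s.startswith(k): s=v; break
def chemReplLoop : String → List (String × String) → String
  | s, [] => s
  | s, (k, v) :: rest => if PySem.Str.startswith s k then v else chemReplLoop s rest

def chem_symbol (species : Option String) : String :=
  match species with
  | none => ""
  | some sp =>    -- s.split()[0] is pyGet? …; none (IndexError) is excluded by Pre_, .getD "" is never taken there
    ((PySem.List.pyGet? (PySem.Str.split₀ (chemReplLoop (PySem.Str.strip sp) chemRepl)) 0).map chemSubs).getD ""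


-- ===== PORT B =====
-- the _SUB dict of B (single chars on both sides)
def chemSub : PySem.Dict Char Char :=
  ⟨[('0','₀'),('1','₁'),('2','₂'),('3','₃'),('4','₄'),('5','₅'),
    ('6','₆'),('7','₇'),('8','₈'),('9','₉'),('+','⁺'),('-','⁻')]⟩

-- the for-loop of B: out and started are the loop state; break/return reduce to stopping
def chemScan : List Char → Bool → List Char → String
  | [], _, out => String.ofList out          -- "".join(out)
  | c :: rest, started, out =>
    if PySem.Chars.isspace c then
      if started then String.ofList out      -- break, then "".join(out)
      else chemScan rest started out         -- leading whitespace: skip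
    else chemScan rest true (out ++ [PySem.Dict.getD chemSub c c])

def chem_symbol_alt (species : Option String) : String :=
  match species with
  | none => ""
  | some sp => chemScan sp.toList false []


-- ===== PRECONDITION & SPEC =====
-- Pre_ excludes only whitespace-only (incl. empty) strings, on which A raises IndexError at split()[0].
def Pre_chem_symbol (species : Option String) : Prop :=
  (species.map (fun sp => PySem.Str.strip sp != "")).getD true = true

instance (species : Option String) : Decidable (Pre_chem_symbol species) := by
  unfold Pre_chem_symbol; infer_instance

def pvWitness_chem_symbol : Option String := some "N2+ 1N"

def Spec_chem_symbol (species : Option String) (out : String) : Prop := out = chem_symbol_alt species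
instance (species : Option String) (out : String) : Decidable (Spec_chem_symbol species out) := by unfold Spec_chem_symbol; infer_instance

-- ===== CLAIM (what is proved, stated in full; the proofs are below) =====
def Claim_equal_chem_symbol : Prop := ∀ (species : Option String), Dom_chem_symbol species → Pre_chem_symbol species → Spec_chem_symbol species (chem_symbol species)

-- ===== LEMMAS AND PROOFS =====

-- ---- A-side: the repl loop never changes the first token of the stripped string ----

-- split₀.go distributes over its accumulator
theorem pv_go_acc (s : List Char) : ∀ cur acc,
    PySem.Chars.split₀.go s cur acc = acc.reverse ++ PySem.Chars.split₀.go s cur [] := by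
  induction s with
  | nil => intro cur acc; simp [PySem.Chars.split₀.go]; split <;> simp
  | cons c rest ih =>
    intro cur acc
    simp only [PySem.Chars.split₀.go]
    split
    · split
      · exact ih [] acc
      · rw [ih [] (cur.reverse :: acc), ih [] [cur.reverse]]; simp
    · exact ih (c :: cur) acc

-- split₀.go absorbs a run of non-space characters into the current word
theorem pv_go_word (w : List Char) (h : ∀ c ∈ w, PySem.Chars.isspace c = false) : ∀ s cur acc,
    PySem.Chars.split₀.go (w ++ s) cur acc = PySem.Chars.split₀.go s (w.reverse ++ cur) acc := by
  induction w with
  | nil => intro s cur acc; simp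
  | cons c w' ih =>
    intro s cur acc
    have hc : PySem.Chars.isspace c = false := h c (by simp)
    simp only [List.cons_append, PySem.Chars.split₀.go, hc]
    simp only [Bool.false_eq_true, if_false]
    rw [ih (fun d hd => h d (by simp [hd]))]
    simp

-- the first element of split() of "word ++ rest" is that word, when rest starts with a space (or is empty)
theorem pv_split₀_first (w r : List Char) (hw : w ≠ [])
    (hns : ∀ c ∈ w, PySem.Chars.isspace c = false)
    (hr : ∀ h : r ≠ [], PySem.Chars.isspace (r.head h) = true) :
    ∃ t, PySem.Chars.split₀ (w ++ r) = w :: t := by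
  unfold PySem.Chars.split₀
  rw [pv_go_word w hns r [] []]
  cases r with
  | nil =>
    refine ⟨[], ?_⟩
    simp [PySem.Chars.split₀.go, hw]
  | cons c r' =>
    have hc : PySem.Chars.isspace c = true := hr (by simp)
    refine ⟨PySem.Chars.split₀.go r' [] [], ?_⟩
    simp only [PySem.Chars.split₀.go, hc, if_true, List.append_nil]
    have hwr : w.reverse.isEmpty = false := by simpa using hw
    simp only [hwr, Bool.false_eq_true, if_false, List.reverse_reverse]
    rw [pv_go_acc]
    simp

-- if a key of the table (= word ++ ' ' ++ more) prefixes the stripped string, the first token of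
-- the stripped string is that word, which is also split(value)[0] for that key's value
theorem pv_key_token (sp : String) (k v : String) (vc kr : List Char)
    (hvc : v.toList = vc) (hk : k.toList = vc ++ ' ' :: kr)
    (hns : ∀ c ∈ vc, PySem.Chars.isspace c = false) (hvne : vc ≠ [])
    (hsingle : PySem.Chars.split₀ vc = [vc])
    (hpre : k.toList <+: PySem.Chars.strip sp.toList) :
    PySem.List.pyGet? (PySem.Str.split₀ v) 0 = PySem.List.pyGet? (PySem.Str.split₀ (PySem.Str.strip sp)) 0 := by
  rw [hk] at hpre
  obtain ⟨tail, htail⟩ := hpre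
  obtain ⟨t, ht⟩ : ∃ t, PySem.Chars.split₀ (PySem.Chars.strip sp.toList) = vc :: t := by
    rw [← htail, List.append_assoc]
    exact pv_split₀_first vc (' ' :: (kr ++ tail)) hvne hns
      (fun _ => by show PySem.Chars.isspace ' ' = true; decide)
  have hL : PySem.Str.split₀ v = [String.ofList vc] := by
    unfold PySem.Str.split₀
    rw [hvc, hsingle]; rfl
  have hR : PySem.Str.split₀ (PySem.Str.strip sp) = String.ofList vc :: t.map String.ofList := by
    unfold PySem.Str.split₀
    rw [PySem.Str.toList_strip, ht]; rfl
  rw [hL, hR]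
  simp [PySem.List.pyGet?, PySem.List.pyIdx?]

-- A key of the table is a word, a space and more; its value is that word
def chemGoodKey (p : String × String) : Prop :=
  ∃ vc kr, p.2.toList = vc ∧ p.1.toList = vc ++ ' ' :: kr ∧
    (∀ c ∈ vc, PySem.Chars.isspace c = false) ∧ vc ≠ [] ∧ PySem.Chars.split₀ vc = [vc]

-- a loop over such keys never changes the first token of the stripped string
theorem pv_loop_gen (sp : String) : ∀ (l : List (String × String)), (∀ p ∈ l, chemGoodKey p) →
    PySem.List.pyGet? (PySem.Str.split₀ (chemReplLoop (PySem.Str.strip sp) l)) 0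
      = PySem.List.pyGet? (PySem.Str.split₀ (PySem.Str.strip sp)) 0 := by
  intro l
  induction l with
  | nil => intro _; rfl
  | cons p rest ih =>
    intro hall
    obtain ⟨k, v⟩ := p
    obtain ⟨vc, kr, hvc, hk, hns, hvne, hsingle⟩ := hall (k, v) (by simp)
    cases hc : PySem.Str.startswith (PySem.Str.strip sp) k with
    | false =>
      simp only [chemReplLoop, hc, Bool.false_eq_true, if_false]
      exact ih (fun q hq => hall q (by simp [hq]))
    | true =>
      simp only [chemReplLoop, hc, if_true]
      refine pv_key_token sp k v vc kr hvc hk hns hvne hsingle ?_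
      rw [PySem.Str.startswith_eq, PySem.Str.toList_strip, PySem.Chars.startswith_iff] at hc
      exact hc

-- every key of A's table is of that shape
theorem pv_repl_good : ∀ p ∈ chemRepl, chemGoodKey p := by
  intro p hp
  simp only [chemRepl, List.mem_cons, List.not_mem_nil, or_false] at hp
  rcases hp with h | h | h | h | h | h | h | h <;> subst h
  · exact ⟨['N','2'], ['2','P'], by simp, by simp, by intro c hc; fin_cases hc <;> simp [PySem.Chars.isspace], by decide, by decide⟩
  · exact ⟨['N','2'], ['1','P'], by simp, by simp, by intro c hc; fin_cases hc <;> simp [PySem.Chars.isspace], by decide, by decide⟩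
  · exact ⟨['N','2','+'], ['1','N'], by simp, by simp, by intro c hc; fin_cases hc <;> simp [PySem.Chars.isspace], by decide, by decide⟩
  · exact ⟨['C','2'], ['S','w','a','n'], by simp, by simp, by intro c hc; fin_cases hc <;> simp [PySem.Chars.isspace], by decide, by decide⟩
  · exact ⟨['C','H'], ['G','-','b','a','n','d'], by simp, by simp, by intro c hc; fin_cases hc <;> simp [PySem.Chars.isspace], by decide, by decide⟩
  · exact ⟨['C','N'], ['v','i','o','l','e','t'], by simp, by simp, by intro c hc; fin_cases hc <;> simp [PySem.Chars.isspace], by decide, by decide⟩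
  · exact ⟨['O','2'], ['A',' ','(','a','b','s',')'], by simp, by simp, by intro c hc; fin_cases hc <;> simp [PySem.Chars.isspace], by decide, by decide⟩
  · exact ⟨['O','2'], ['B',' ','(','a','b','s',')'], by simp, by simp, by intro c hc; fin_cases hc <;> simp [PySem.Chars.isspace], by decide, by decide⟩

-- ---- the character maps of A and B agree ----

-- one step of replace with single-character old and new is a per-character map
theorem pv_replace_go_single (o n : Char) : ∀ (fuel : Nat) (l : List Char) (acc : List Char),
    l.length ≤ fuel →
    PySem.Chars.replace.go [o] [n] fuel l acc
      = acc.reverse ++ l.map (fun c => if c = o then n else c) := by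
  intro fuel
  induction fuel with
  | zero =>
    intro l acc h
    have hl : l = [] := List.length_eq_zero_iff.mp (Nat.le_zero.mp h)
    simp [hl, PySem.Chars.replace.go]
  | succ f ih =>
    intro l acc h
    cases l with
    | nil => simp [PySem.Chars.replace.go]
    | cons c t =>
      simp only [PySem.Chars.replace.go]
      by_cases hc : c = o
      · subst hc
        have : List.isPrefixOf [c] (c :: t) = true := by simp [List.isPrefixOf]
        rw [if_pos this, show List.drop [c].length (c :: t) = t from rfl,
            ih t _ (by simpa using Nat.le_of_succ_le_succ h)]
        simp
      · have : List.isPrefixOf [o] (c :: t) = false := by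
          simp [List.isPrefixOf]; exact fun h' => absurd h'.symm hc
        rw [if_neg (by simp [this]), ih t _ (by simpa using Nat.le_of_succ_le_succ h)]
        simp [hc]

theorem pv_replace_single (o n : Char) (l : List Char) :
    PySem.Chars.replace l [o] [n] = l.map (fun c => if c = o then n else c) := by
  unfold PySem.Chars.replace
  rw [if_neg (by simp), pv_replace_go_single o n l.length l [] le_rfl]
  simp

-- A's translate-then-replace composition equals B's dict lookup, character by character
theorem pv_char_map (c : Char) :
    (if (if (chemSubDigit c) = '+' then '⁺' else chemSubDigit c) = '-' then '⁻'
     else (if (chemSubDigit c) = '+' then '⁺' else chemSubDigit c))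
      = PySem.Dict.getD chemSub c c := by
  by_cases h0 : c = '0'; · subst h0; decide
  by_cases h1 : c = '1'; · subst h1; decide
  by_cases h2 : c = '2'; · subst h2; decide
  by_cases h3 : c = '3'; · subst h3; decide
  by_cases h4 : c = '4'; · subst h4; decide
  by_cases h5 : c = '5'; · subst h5; decide
  by_cases h6 : c = '6'; · subst h6; decide
  by_cases h7 : c = '7'; · subst h7; decide
  by_cases h8 : c = '8'; · subst h8; decide
  by_cases h9 : c = '9'; · subst h9; decide
  by_cases hp : c = '+'; · subst hp; decide
  by_cases hm : c = '-'; · subst hm; decide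
  have hd : chemSubDigit c = c := by
    simp [chemSubDigit, h0, h1, h2, h3, h4, h5, h6, h7, h8, h9]
  rw [hd, if_neg hp, if_neg hm]
  have e0 : ('0' == c) = false := beq_eq_false_iff_ne.mpr (Ne.symm h0)
  have e1 : ('1' == c) = false := beq_eq_false_iff_ne.mpr (Ne.symm h1)
  have e2 : ('2' == c) = false := beq_eq_false_iff_ne.mpr (Ne.symm h2)
  have e3 : ('3' == c) = false := beq_eq_false_iff_ne.mpr (Ne.symm h3)
  have e4 : ('4' == c) = false := beq_eq_false_iff_ne.mpr (Ne.symm h4)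
  have e5 : ('5' == c) = false := beq_eq_false_iff_ne.mpr (Ne.symm h5)
  have e6 : ('6' == c) = false := beq_eq_false_iff_ne.mpr (Ne.symm h6)
  have e7 : ('7' == c) = false := beq_eq_false_iff_ne.mpr (Ne.symm h7)
  have e8 : ('8' == c) = false := beq_eq_false_iff_ne.mpr (Ne.symm h8)
  have e9 : ('9' == c) = false := beq_eq_false_iff_ne.mpr (Ne.symm h9)
  have ep : ('+' == c) = false := beq_eq_false_iff_ne.mpr (Ne.symm hp)
  have em : ('-' == c) = false := beq_eq_false_iff_ne.mpr (Ne.symm hm)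
  simp [PySem.Dict.getD, PySem.Dict.get?, chemSub, List.find?,
        e0, e1, e2, e3, e4, e5, e6, e7, e8, e9, ep, em]

-- chemSubs of a word is the per-character image under B's map
theorem pv_chemSubs_map (w : List Char) :
    chemSubs (String.ofList w) = String.ofList (w.map (fun c => PySem.Dict.getD chemSub c c)) := by
  unfold chemSubs
  simp only [PySem.Str.replace, String.toList_ofList]
  rw [show ("+" : String).toList = ['+'] from rfl, show ("⁺" : String).toList = ['⁺'] from rfl,
      show ("-" : String).toList = ['-'] from rfl, show ("⁻" : String).toList = ['⁻'] from rfl,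
      pv_replace_single, pv_replace_single]
  simp only [List.map_map]
  congr 1
  exact List.map_congr_left fun c _ => pv_char_map c

-- ---- B-side: the scan computes the mapped first token ----

-- leading whitespace is skipped
theorem pv_scan_lstrip (L : List Char) :
    chemScan L false [] = chemScan (L.dropWhile PySem.Chars.isspace) false [] := by
  induction L with
  | nil => rfl
  | cons c t ih =>
    by_cases hc : PySem.Chars.isspace c = true
    · simp only [chemScan, hc, if_true, List.dropWhile_cons]; exact ih
    · simp only [List.dropWhile_cons, if_neg hc]

-- a run of non-space characters is emitted through the map
theorem pv_scan_word (w : List Char) (hns : ∀ c ∈ w, PySem.Chars.isspace c = false) :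
    ∀ (r : List Char) (b : Bool) (out : List Char),
    chemScan (w ++ r) b out
      = chemScan r (if w.isEmpty then b else true)
          (out ++ w.map (fun c => PySem.Dict.getD chemSub c c)) := by
  induction w with
  | nil => intro r b out; simp
  | cons c w' ih =>
    intro r b out
    have hc : PySem.Chars.isspace c = false := hns c (by simp)
    simp only [List.cons_append, chemScan, hc, Bool.false_eq_true, if_false]
    rw [ih (fun d hd => hns d (by simp [hd]))]
    simp

-- the scan stops at the end or at the first whitespace after the token
theorem pv_scan_stop (r : List Char) (hr : ∀ h : r ≠ [], PySem.Chars.isspace (r.head h) = true)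
    (out : List Char) : chemScan r true out = String.ofList out := by
  cases r with
  | nil => rfl
  | cons c t =>
    have hc : PySem.Chars.isspace c = true := hr (by simp)
    simp [chemScan, hc]

-- ---- stripping decomposes around the first token ----

theorem pv_rstrip_word_append (w r : List Char) (hw : w ≠ [])
    (hns : ∀ c ∈ w, PySem.Chars.isspace c = false) :
    PySem.Chars.rstrip (w ++ r) = w ++ PySem.Chars.rstrip r := by
  unfold PySem.Chars.rstrip
  rw [List.reverse_append, List.dropWhile_append]
  obtain ⟨wl, wt, hwrev⟩ : ∃ wl wt, w.reverse = wl :: wt := by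
    cases hw' : w.reverse with
    | nil => exact absurd (by simpa using hw') hw
    | cons a b => exact ⟨a, b, rfl⟩
  have hwl : PySem.Chars.isspace wl = false := by
    have : wl ∈ w := by
      have : wl ∈ w.reverse := by rw [hwrev]; simp
      simpa using this
    exact hns wl this
  split
  · next h =>
    have : List.dropWhile PySem.Chars.isspace r.reverse = [] := by
      simpa [List.isEmpty_iff] using h
    have hwid : wt.reverse ++ [wl] = w := by
      have := congrArg List.reverse hwrev
      simpa using this.symm
    rw [this, hwrev]
    simp [hwl, hwid]
  · simp

-- head of the residue after the first token is whitespace (or the residue is empty)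
theorem pv_residue_head (d : List Char)
    (r : List Char) (hr : r = d.dropWhile (fun c => !PySem.Chars.isspace c)) :
    ∀ h : r ≠ [], PySem.Chars.isspace (r.head h) = true := by
  intro h
  subst hr
  have := List.head_dropWhile_not (fun c => !PySem.Chars.isspace c) h
  simpa using this

-- rstrip of the residue keeps the whitespace head (or is empty)
theorem pv_rstrip_residue_head (r : List Char)
    (hr : ∀ h : r ≠ [], PySem.Chars.isspace (r.head h) = true) :
    ∀ h : PySem.Chars.rstrip r ≠ [], PySem.Chars.isspace ((PySem.Chars.rstrip r).head h) = true := by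
  intro h
  have hpre : (PySem.Chars.rstrip r) <+: r := by
    unfold PySem.Chars.rstrip
    have := List.dropWhile_suffix (l := r.reverse) (p := PySem.Chars.isspace)
    have := this.reverse
    simpa using this
  obtain ⟨t, ht⟩ := hpre
  have hrne : r ≠ [] := by intro h0; rw [h0] at ht; simp_all
  have h2 : (PySem.Chars.rstrip r ++ t).head? = (PySem.Chars.rstrip r).head? := by
    cases hcase : PySem.Chars.rstrip r with
    | nil => exact absurd hcase h
    | cons a b => simp
  have h3 : r.head? = (PySem.Chars.rstrip r).head? := by
    conv_lhs => rw [← ht]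
    exact h2
  rw [List.head?_eq_some_head hrne, List.head?_eq_some_head h] at h3
  have h4 : (PySem.Chars.rstrip r).head h = r.head hrne := (Option.some_injective _ h3).symm
  rw [h4]
  exact hr hrne

-- ===== VERDICT (by name: the statement is the Claim_ definition above) =====
theorem chem_symbol_spec : Claim_equal_chem_symbol := by
  intro species _hdom hpre
  unfold Spec_chem_symbol
  cases species with
  | none => rfl
  | some sp =>
    -- notation for the decomposition of sp around its first token
    set L := sp.toList with hL
    set d := L.dropWhile PySem.Chars.isspace with hd
    set w := d.takeWhile (fun c => !PySem.Chars.isspace c) with hw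
    set r := d.dropWhile (fun c => !PySem.Chars.isspace c) with hr
    have hdwr : d = w ++ r := (List.takeWhile_append_dropWhile).symm
    have hns : ∀ c ∈ w, PySem.Chars.isspace c = false := by
      intro c hc
      have := List.mem_takeWhile_imp hc
      simpa using this
    -- Pre_ gives a non-empty first token
    have hstrip_ne : PySem.Chars.strip L ≠ [] := by
      simp only [Pre_chem_symbol, Option.map_some, Option.getD_some, bne_iff_ne, ne_eq] at hpre
      intro h0
      apply hpre
      have : (PySem.Str.strip sp).toList = ([] : List Char) := by
        rw [PySem.Str.toList_strip, h0]
      exact String.toList_inj.mp (by simpa using this)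
    have hdne : d ≠ [] := by
      intro h0
      apply hstrip_ne
      show PySem.Chars.rstrip (PySem.Chars.lstrip L) = []
      unfold PySem.Chars.lstrip
      rw [← hd, h0]; rfl
    have hwne : w ≠ [] := by
      obtain ⟨c, t, hct⟩ : ∃ c t, d = c :: t := by
        cases hdd : d with
        | nil => exact absurd hdd hdne
        | cons a b => exact ⟨a, b, rfl⟩
      have hcns : PySem.Chars.isspace c = false := by
        have := List.head_dropWhile_not PySem.Chars.isspace (l := L) (by rw [← hd, hct]; simp)
        simp only [← hd, hct, List.head_cons] at this
        exact this
      rw [hw, hct]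
      simp [hcns]
    have hrh : ∀ h : r ≠ [], PySem.Chars.isspace (r.head h) = true := pv_residue_head d r hr
    -- the stripped string is the token followed by the r-stripped residue
    have hstrip : PySem.Chars.strip L = w ++ PySem.Chars.rstrip r := by
      show PySem.Chars.rstrip (PySem.Chars.lstrip L) = _
      unfold PySem.Chars.lstrip
      rw [← hd, hdwr]
      exact pv_rstrip_word_append w r hwne hns
    -- A reduces to chemSubs of the first token
    obtain ⟨t, ht⟩ : ∃ t, PySem.Chars.split₀ (PySem.Chars.strip L) = w :: t := by
      rw [hstrip]
      exact pv_split₀_first w (PySem.Chars.rstrip r) hwne hns (pv_rstrip_residue_head r hrh)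
    have hA : chem_symbol (some sp) = chemSubs (String.ofList w) := by
      show ((PySem.List.pyGet? (PySem.Str.split₀ (chemReplLoop (PySem.Str.strip sp) chemRepl)) 0).map chemSubs).getD "" = _
      rw [pv_loop_gen sp chemRepl pv_repl_good]
      have hsplit : PySem.Str.split₀ (PySem.Str.strip sp) = String.ofList w :: t.map String.ofList := by
        unfold PySem.Str.split₀
        rw [PySem.Str.toList_strip, ht]; rfl
      rw [hsplit]
      simp [PySem.List.pyGet?, PySem.List.pyIdx?]
    -- B reduces to the mapped first token
    have hB : chem_symbol_alt (some sp) = String.ofList (w.map (fun c => PySem.Dict.getD chemSub c c)) := by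
      show chemScan L false [] = _
      rw [pv_scan_lstrip, ← hd, hdwr, pv_scan_word w hns r false []]
      have : w.isEmpty = false := by simpa using hwne
      rw [this]
      simpa using pv_scan_stop r hrh _
    rw [hA, hB, pv_chemSubs_map]
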